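-- pv_equiv track=rewrite | github.com/Tasmia-5/pythonProject3 | connect_four.py | insert_chip
-- ===== SOURCE A (Python) =====
-- def insert_chip(board, col, chip_type):
--     row = -1
--     for i in range(len(board) - 1, -1, -1):
--         if board[i][col] == '-':
--             board[i][col] = chip_type
--             row = i
--             break
--     return row
-- ===== SOURCE B (Python) =====
-- def insert_chip(board, col, chip_type):
--     empties = [i for i, row in enumerate(board) if row[col] == '-']
--     if not empties:
--         return -1
--     row = max(empties)
--     board[row][col] = chip_type
--     return row
-- ===== Notes on version B (the rewrite author's own statement) =====
-- stated objective: alternative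
-- what changed: Instead of scanning bottom-up with an early break, B collects all empty row indices of the column in one comprehension and takes their maximum (the lowest empty cell), mutating the board the same way.
-- outside the precondition, e.g. on insert_chip([['x'], ['-', '-']], 1, 'o'): A returns 1, B raises IndexError
import Mathlib
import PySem

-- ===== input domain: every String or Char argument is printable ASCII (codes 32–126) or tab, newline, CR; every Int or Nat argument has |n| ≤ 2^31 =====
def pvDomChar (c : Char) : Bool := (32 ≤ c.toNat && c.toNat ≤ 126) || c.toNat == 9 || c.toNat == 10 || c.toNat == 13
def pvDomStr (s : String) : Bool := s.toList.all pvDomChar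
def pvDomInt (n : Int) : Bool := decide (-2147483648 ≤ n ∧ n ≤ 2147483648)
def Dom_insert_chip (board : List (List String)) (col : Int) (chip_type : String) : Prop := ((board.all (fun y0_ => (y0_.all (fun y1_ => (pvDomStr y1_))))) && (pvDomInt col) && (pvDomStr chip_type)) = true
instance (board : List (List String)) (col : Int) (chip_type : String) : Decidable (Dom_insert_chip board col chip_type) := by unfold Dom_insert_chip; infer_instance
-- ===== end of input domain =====

-- B replaces A's bottom-up scan with an early break by a comprehension of all empty row
-- indices and a max over them (objective: alternative, same cost). Both Pythons mutate
-- board[row][col] identically; the equivalence proved here is about the RETURN value only.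

-- ===== PORT A =====
-- hand transliteration of `for i in range(len(board) - 1, -1, -1): if board[i][col] == '-': …; break`:
-- the loop counter k+1 stands for i+1, so the branch reads cell i = k; board[i] is exact
-- (i is produced in range by the loop), board[i][col] is total via pyGetD under Pre_.
def insertChipScan (board : List (List String)) (col : Int) : Nat → Int
  | 0 => -1
  | Nat.succ k =>
      if PySem.List.pyGetD (PySem.List.pyGetD board (k : Int) []) col "" = "-" then (k : Int)
      else insertChipScan board col k

def insert_chip (board : List (List String)) (col : Int) (chip_type : String) : Int :=
  insertChipScan board col board.length

-- ===== PORT B =====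
def insert_chip_alt (board : List (List String)) (col : Int) (chip_type : String) : Int :=
  -- empties = [i for i, row in enumerate(board) if row[col] == '-']; row[col] via pyGetD under Pre_
  match PySem.List.max? (((PySem.List.enumerate board).filter
      (fun p => PySem.List.pyGetD p.2 col "" = "-")).map (fun p => p.1)) (fun i => i) with
  | none => -1
  | some row => row

-- ===== PRECONDITION & SPEC =====
-- Pre_ excludes exactly the inputs where row[col] raises IndexError in one of the programs;
-- it also excludes inputs where A returns because a '-' below the offending row stops its
-- scan early (e.g. [['x'], ['-','-']] with col 1), on which B's natural comprehension raises.
def Pre_insert_chip (board : List (List String)) (col : Int) (chip_type : String) : Prop :=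
  ∀ r ∈ board, PySem.Raise.InRange r.length col
instance (board : List (List String)) (col : Int) (chip_type : String) : Decidable (Pre_insert_chip board col chip_type) := by unfold Pre_insert_chip; infer_instance

def pvWitness_insert_chip : List (List String) × Int × String := ([["-", "x"], ["o", "-"]], 1, "o")

def Spec_insert_chip (board : List (List String)) (col : Int) (chip_type : String) (out : Int) : Prop := out = insert_chip_alt board col chip_type
instance (board : List (List String)) (col : Int) (chip_type : String) (out : Int) : Decidable (Spec_insert_chip board col chip_type out) := by unfold Spec_insert_chip; infer_instance

-- ===== CLAIM (what is proved, stated in full; the proofs are below) =====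
def Claim_equal_insert_chip : Prop := ∀ (board : List (List String)) (col : Int) (chip_type : String), Dom_insert_chip board col chip_type → Pre_insert_chip board col chip_type → Spec_insert_chip board col chip_type (insert_chip board col chip_type)

-- ===== LEMMAS AND PROOFS =====

-- the Boolean "cell k of the column is empty", with A's total row access board.getD
def pvEmptyAt (board : List (List String)) (col : Int) (k : Nat) : Bool :=
  decide (PySem.List.pyGetD (board.getD k []) col "" = "-")

-- A's scan returns the LAST index k < n with an empty cell (scan from the top = last hit)
theorem insertChipScan_eq_getLast (board : List (List String)) (col : Int) :
    ∀ n : Nat, insertChipScan board col n =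
      match ((List.range n).filter (pvEmptyAt board col)).getLast? with
      | none => -1
      | some k => (k : Int) := by
  intro n
  induction n with
  | zero => rfl
  | succ n ih =>
      rw [List.range_succ, List.filter_append]
      simp only [insertChipScan, PySem.List.pyGetD_natCast]
      by_cases h : pvEmptyAt board col n = true
      · rw [if_pos (by simpa [pvEmptyAt] using h)]
        have hf : List.filter (pvEmptyAt board col) [n] = [n] := by simp [h]
        rw [hf, List.getLast?_concat]
      · rw [if_neg (by simpa [pvEmptyAt] using h)]
        have hf : List.filter (pvEmptyAt board col) [n] = [] := by simp [h]
        rw [hf, List.append_nil, ih]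

-- B's comprehension over enumerate, as a filter of index ranges
theorem enumerate_filter_map (q : List String → Bool) :
    ∀ (xs : List (List String)) (s : Nat),
      ((PySem.List.enumerate xs (s : Int)).filter (fun p => q p.2)).map (fun p => p.1)
        = ((List.range xs.length).filter (fun k => q (xs.getD k []))).map
            (fun k => ((s + k : Nat) : Int)) := by
  intro xs
  induction xs with
  | nil => intro s; rfl
  | cons x t ih =>
      intro s
      have hcast : ((s : Int) + 1) = ((s + 1 : Nat) : Int) := by push_cast; ring
      have htail :
          ((PySem.List.enumerate t ((s : Int) + 1)).filter (fun p => q p.2)).map (fun p => p.1)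
            = ((List.range t.length).filter (fun k => q (t.getD k []))).map
                (fun k => ((s + Nat.succ k : Nat) : Int)) := by
        rw [hcast, ih (s + 1)]
        apply List.map_congr_left
        intro k _
        congr 1
        omega
      simp only [PySem.List.enumerate_cons, List.length_cons, List.range_succ_eq_map,
        List.filter_cons, List.filter_map, List.getD_cons_zero, Function.comp_def,
        List.getD_cons_succ]
      by_cases h : q x = true
      · simp only [h, if_pos, List.map_cons, List.map_map, Function.comp_def, htail,
          Nat.add_zero]
      · simp only [h, Bool.false_eq_true, if_false, List.map_map, Function.comp_def, htail]

-- max of a strictly increasing Int list is its last element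
theorem foldl_max_of_lt : ∀ (t : List Int) (x : Int),
    (∀ y ∈ t, x < y) → t.Pairwise (· < ·) → t.foldl max x = (x :: t).getLast (by simp) := by
  intro t
  induction t with
  | nil => intro x _ _; rfl
  | cons y t ih =>
      intro x hx hp
      have h1 : max x y = y := max_eq_right (le_of_lt (hx y (by simp)))
      have hp' := List.pairwise_cons.mp hp
      rw [List.foldl_cons, h1, ih y hp'.1 hp'.2]
      rcases t with _ | _ <;> simp [List.getLast]

theorem max?_id_eq_getLast? (l : List Int) (hp : l.Pairwise (· < ·)) :
    PySem.List.max? l (fun i => i) = l.getLast? := by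
  cases l with
  | nil => rfl
  | cons x t =>
      rw [PySem.List.max?_id_cons, foldl_max_of_lt t x (List.pairwise_cons.mp hp).1
        (List.pairwise_cons.mp hp).2]
      simp [List.getLast?_eq_some_getLast]

-- ===== VERDICT (by name: the statement is the Claim_ definition above) =====
theorem insert_chip_spec : Claim_equal_insert_chip := by
  intro board col chip_type _ hpre
  unfold Spec_insert_chip insert_chip insert_chip_alt
  rw [insertChipScan_eq_getLast]
  have henum := enumerate_filter_map
    (fun r => decide (PySem.List.pyGetD r col "" = "-")) board 0
  simp only [Nat.zero_add, Nat.cast_zero] at henum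
  rw [henum]
  have hpair : (List.map (fun k : Nat => (k : Int))
      ((List.range board.length).filter
        (fun k => decide (PySem.List.pyGetD (board.getD k []) col "" = "-")))).Pairwise (· < ·) := by
    apply List.Pairwise.map
    · intro a b h
      exact_mod_cast h
    · exact List.pairwise_lt_range.filter _
  rw [max?_id_eq_getLast? _ hpair, List.getLast?_map]
  unfold pvEmptyAt
  cases ((List.range board.length).filter
      (fun k => decide (PySem.List.pyGetD (board.getD k []) col "" = "-"))).getLast? <;> rfl
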